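-- pv_equiv track=rewrite | github.com/luci18530/Pipeline_Anvisa | src/modules/apresentacao.py | _parse_values_bolsa
-- ===== SOURCE A (Python) =====
-- def _parse_values_bolsa(nums: list[str]) -> list[str]:
--     """
--     Regras especiais para MG/ML quando houver BOLSA/BOLS na apresentacao:
--     - N par de tokens: (n0,n1), (n2,n3), ...
--     - N impar: formar pares da direita p/ esquerda; o primeiro token (se sobrar) fica inteiro.
--     """
--     nums = [x for x in nums if x.isdigit()]
--     n = len(nums)
--     out = []
--     if n == 0:
--         return out
--
--     def make_decimal(a: str, b: str|None) -> str:
--         a_fmt = "0" if not a.isdigit() else str(int(a))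
--         if not b or set(b) == {"0"}:
--             return a_fmt
--         return f"{a_fmt},{b}"
--
--     if n % 2 == 0:
--         # esquerda -> direita
--         for i in range(0, n, 2):
--             out.append(make_decimal(nums[i], nums[i+1]))
--         return out
--     else:
--         # direita -> esquerda, preservando ordem final
--         acc = []
--         i = n - 1
--         while i > 0:
--             acc.append(make_decimal(nums[i-1], nums[i]))
--             i -= 2
--         if i == 0:
--             left = make_decimal(nums[0], None)
--             out = [left] + list(reversed(acc))
--         else:
--             out = list(reversed(acc))
--         return out
-- ===== SOURCE B (Python) =====
-- def _parse_values_bolsa(nums: list[str]) -> list[str]: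
--     nums = [x for x in nums if x.isdigit()]
--     n = len(nums)
--
--     def make_decimal(a: str, b: str | None) -> str:
--         a_fmt = "0" if not a.isdigit() else str(int(a))
--         if not b or set(b) == {"0"}:
--             return a_fmt
--         return f"{a_fmt},{b}"
--
--     out = []
--     i = 0
--     if n % 2 == 1:
--         out.append(make_decimal(nums[0], None))
--         i = 1
--     while i < n:
--         out.append(make_decimal(nums[i], nums[i + 1]))
--         i += 2
--     return out
-- ===== Notes on version B (the rewrite author's own statement) =====
-- stated objective: simpler
-- what changed: A's two direction-specific branches (forward pairing for even n; a right-to-left while loop with a final reverse for odd n) are collapsed into one forward pass that emits the lone head token first when n is odd and then pairs left-to-right from the offset.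
import Mathlib
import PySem

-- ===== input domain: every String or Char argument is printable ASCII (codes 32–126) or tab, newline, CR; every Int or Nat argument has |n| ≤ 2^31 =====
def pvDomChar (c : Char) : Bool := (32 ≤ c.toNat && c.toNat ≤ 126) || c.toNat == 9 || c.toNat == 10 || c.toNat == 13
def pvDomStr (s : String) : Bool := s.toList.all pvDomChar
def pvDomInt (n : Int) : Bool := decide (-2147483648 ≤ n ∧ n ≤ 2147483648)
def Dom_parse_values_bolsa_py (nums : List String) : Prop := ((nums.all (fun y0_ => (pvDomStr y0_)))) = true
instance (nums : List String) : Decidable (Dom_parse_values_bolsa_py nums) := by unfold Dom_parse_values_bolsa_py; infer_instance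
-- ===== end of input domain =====

-- B replaces A's two direction-specific branches (forward pairing for even n; a right-to-left
-- loop plus a final reverse for odd n) by ONE forward pass starting at offset n % 2 (simpler).

-- ===== PORT A =====
-- shared inner helper make_decimal (both Pythons define the identical nested function);
-- `a` is always a digit string here, so int(a) succeeds and `.getD 0` is exact.
def pvMakeDecimal (a : String) (b : Option String) : String :=
  let a_fmt := if !(PySem.Str.strIsdigit a) then "0" else PySem.Int.toStr ((PySem.Int.ofStr? a).getD 0)
  match b with
  | none => a_fmt
  | some bs =>
      if bs = "" ∨ PySem.Set.equal (PySem.Set.ofList bs.toList) (PySem.Set.ofList ['0']) = true then a_fmt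
      else String.ofList (a_fmt.toList ++ ',' :: bs.toList)   -- f"{a_fmt},{b}"

-- A's odd-branch while loop: `while i > 0: acc.append(md(nums[i-1], nums[i])); i -= 2`;
-- returns (acc, final i).  Indices are in range throughout A's run, so pyGetD is exact.
def pvALoop (l : List String) (i : Int) (acc : List String) : List String × Int :=
  if _h : 0 < i then
    pvALoop l (i - 2)
      (acc ++ [pvMakeDecimal (PySem.List.pyGetD l (i - 1) "") (some (PySem.List.pyGetD l i ""))])
  else (acc, i)
termination_by i.toNat
decreasing_by omega

def parse_values_bolsa_py (nums : List String) : List String :=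
  let l := nums.filter (fun x => PySem.Str.strIsdigit x)
  let n : Int := PySem.List.len l
  if n = 0 then []
  else if PySem.Int.mod n 2 = 0 then
    -- for i in range(0, n, 2): out.append(make_decimal(nums[i], nums[i+1]))
    (PySem.List.pyRange 0 n 2).foldl
      (fun out i =>
        out ++ [pvMakeDecimal (PySem.List.pyGetD l i "") (some (PySem.List.pyGetD l (i + 1) ""))]) []
  else
    let p := pvALoop l (n - 1) []
    if p.2 = 0 then
      pvMakeDecimal (PySem.List.pyGetD l 0 "") none :: p.1.reverse  -- [left] + list(reversed(acc))
    else p.1.reverse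

-- ===== PORT B =====
-- the single forward while loop: `while i < n: out.append(md(nums[i], nums[i+1])); i += 2`
def pvBLoop (l : List String) (n : Int) (i : Int) (out : List String) : List String :=
  if _h : i < n then
    pvBLoop l n (i + 2)
      (out ++ [pvMakeDecimal (PySem.List.pyGetD l i "") (some (PySem.List.pyGetD l (i + 1) ""))])
  else out
termination_by (n - i).toNat
decreasing_by omega

def parse_values_bolsa_py_alt (nums : List String) : List String :=
  let l := nums.filter (fun x => PySem.Str.strIsdigit x)
  let n : Int := PySem.List.len l
  let s : Int × List String :=
    if PySem.Int.mod n 2 = 1 then (1, [pvMakeDecimal (PySem.List.pyGetD l 0 "") none]) else (0, [])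
  pvBLoop l n s.1 s.2

-- ===== PRECONDITION & SPEC =====
def Spec_parse_values_bolsa_py (nums : List String) (out : List String) : Prop := out = parse_values_bolsa_py_alt nums
instance (nums : List String) (out : List String) : Decidable (Spec_parse_values_bolsa_py nums out) := by unfold Spec_parse_values_bolsa_py; infer_instance

-- ===== CLAIM (what is proved, stated in full; the proofs are below) =====
def Claim_equal_parse_values_bolsa_py : Prop := ∀ (nums : List String), Dom_parse_values_bolsa_py nums → Spec_parse_values_bolsa_py nums (parse_values_bolsa_py nums)

-- ===== LEMMAS AND PROOFS =====

-- accumulator lemma for B's loop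
theorem pvBLoop_append (l : List String) (n : Int) (i : Int) (out : List String) :
    pvBLoop l n i out = out ++ pvBLoop l n i [] := by
  generalize hm : (n - i).toNat = m
  induction m using Nat.strong_induction_on generalizing i out with
  | _ m IH =>
    conv_lhs => rw [pvBLoop]
    conv_rhs => rw [pvBLoop]
    split_ifs with h
    · rw [IH (n - (i + 2)).toNat (by omega) (i + 2) _ rfl,
        IH (n - (i + 2)).toNat (by omega) (i + 2)
          ([] ++ [pvMakeDecimal (PySem.List.pyGetD l i "") (some (PySem.List.pyGetD l (i + 1) ""))]) rfl]
      simp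
    · simp

-- accumulator lemma for A's loop
theorem pvALoop_append (l : List String) (i : Int) (acc : List String) :
    pvALoop l i acc = (acc ++ (pvALoop l i []).1, (pvALoop l i []).2) := by
  generalize hm : i.toNat = m
  induction m using Nat.strong_induction_on generalizing i acc with
  | _ m IH =>
    conv_lhs => rw [pvALoop]
    conv_rhs => rw [pvALoop]
    split_ifs with h
    · rw [IH (i - 2).toNat (by omega) (i - 2) _ rfl,
        IH (i - 2).toNat (by omega) (i - 2)
          ([] ++ [pvMakeDecimal (PySem.List.pyGetD l (i - 1) "") (some (PySem.List.pyGetD l i ""))]) rfl]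
      simp
    · simp

-- step-2 range unfolding
theorem pvRange_two_cons (a b : Int) (h : a < b) :
    PySem.List.pyRange a b 2 = a :: PySem.List.pyRange (a + 2) b 2 := by
  rw [PySem.List.pyRange_of_pos _ _ (by norm_num), PySem.List.pyRange_of_pos _ _ (by norm_num)]
  have hc : (if a < b then ((b - a + 2 - 1) / 2).toNat else 0)
      = (if a + 2 < b then ((b - (a + 2) + 2 - 1) / 2).toNat else 0) + 1 := by
    split_ifs <;> omega
  rw [hc, List.range_succ_eq_map]
  simp only [List.map_cons, List.map_map]
  refine congrArg₂ List.cons (by norm_num) ?_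
  apply List.map_congr_left
  intro k _
  simp only [Function.comp, Nat.succ_eq_add_one]
  push_cast
  ring

theorem pvRange_two_nil (a b : Int) (h : b ≤ a) : PySem.List.pyRange a b 2 = [] := by
  rw [PySem.List.pyRange_of_pos _ _ (by norm_num)]
  have : (if a < b then ((b - a + 2 - 1) / 2).toNat else 0) = 0 := by split_ifs <;> omega
  rw [this]; simp

-- A's even-branch fold over range(0, n, 2) is B's forward loop
theorem pvFoldl_eq_bLoop (l : List String) (n : Int) (i : Int) (out : List String) :
    (PySem.List.pyRange i n 2).foldl
      (fun out j =>
        out ++ [pvMakeDecimal (PySem.List.pyGetD l j "") (some (PySem.List.pyGetD l (j + 1) ""))]) out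
    = pvBLoop l n i out := by
  generalize hm : (n - i).toNat = m
  induction m using Nat.strong_induction_on generalizing i out with
  | _ m IH =>
    rw [pvBLoop]
    split_ifs with h
    · rw [pvRange_two_cons _ _ h, List.foldl_cons]
      exact IH (n - (i + 2)).toNat (by omega) (i + 2) _ rfl
    · rw [pvRange_two_nil _ _ (by omega), List.foldl_nil]

-- snoc lemma: extending the upper bound by 2 appends one pair
theorem pvBLoop_snoc (l : List String) (m j : Int) (hj : j ≤ m) (hp : (m - j) % 2 = 0) :
    pvBLoop l (m + 2) j [] =
      pvBLoop l m j [] ++ [pvMakeDecimal (PySem.List.pyGetD l m "") (some (PySem.List.pyGetD l (m + 1) ""))] := by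
  generalize hk : (m - j).toNat = k
  induction k using Nat.strong_induction_on generalizing j with
  | _ k IH =>
    rcases eq_or_lt_of_le hj with heq | hlt
    · subst heq
      conv_lhs => rw [pvBLoop, pvBLoop]
      conv_rhs => rw [pvBLoop]
      split_ifs <;> first | omega | simp
    · conv_lhs => rw [pvBLoop]
      conv_rhs => rw [pvBLoop]
      split_ifs with h1 _h2 <;> try omega
      rw [pvBLoop_append l (m + 2) (j + 2), pvBLoop_append l m (j + 2),
        IH (m - (j + 2)).toNat (by omega) (j + 2) (by omega) (by omega) rfl]
      simp

-- A's right-to-left loop, reversed, is B's forward loop from offset 1; final i is 0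
theorem pvALoop_rev (l : List String) (k : Nat) :
    (pvALoop l (2 * (k : Int)) []).2 = 0 ∧
      ((pvALoop l (2 * (k : Int)) []).1).reverse = pvBLoop l (2 * (k : Int) + 1) 1 [] := by
  induction k with
  | zero =>
      rw [pvALoop, pvBLoop]
      norm_num
  | succ k IH =>
      have ec : ((k + 1 : Nat) : Int) = (k : Int) + 1 := by push_cast; ring
      have e1 : (2 : Int) * ((k : Int) + 1) - 2 = 2 * (k : Int) := by ring
      have e2 : (2 : Int) * ((k : Int) + 1) - 1 = 2 * (k : Int) + 1 := by ring
      have e3 : (2 : Int) * ((k : Int) + 1) + 1 = (2 * (k : Int) + 1) + 2 := by ring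
      have e4 : (2 : Int) * ((k : Int) + 1) = (2 * (k : Int) + 1) + 1 := by ring
      rw [ec, e3, pvBLoop_snoc l (2 * (k : Int) + 1) 1 (by omega) (by omega), pvALoop,
        dif_pos (by omega : (0 : Int) < 2 * ((k : Int) + 1)), pvALoop_append, e1, e2, e4]
      refine ⟨IH.1, ?_⟩
      rw [← IH.2]
      simp
theorem pvMod_two (n : Int) (_hn : 0 ≤ n) : PySem.Int.mod n 2 = n % 2 := by
  simp [PySem.Int.mod, Int.fmod_eq_emod]

-- ===== VERDICT (by name: the statement is the Claim_ definition above) =====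
theorem parse_values_bolsa_py_spec : Claim_equal_parse_values_bolsa_py := by
  intro nums _
  unfold Spec_parse_values_bolsa_py
  simp only [parse_values_bolsa_py, parse_values_bolsa_py_alt]
  set l := nums.filter (fun x => PySem.Str.strIsdigit x) with hl
  have hlen : PySem.List.len l = (l.length : Int) := by simp [PySem.List.len]
  rw [hlen, pvMod_two _ (Int.natCast_nonneg _)]
  by_cases h0 : (l.length : Int) = 0
  · rw [if_pos h0, if_neg (by omega : ¬ ((l.length : Int) % 2 = 1))]
    simp [pvBLoop, h0]
  · rw [if_neg h0]
    by_cases he : (l.length : Int) % 2 = 0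
    · rw [if_pos he, if_neg (by omega : ¬ ((l.length : Int) % 2 = 1))]
      exact pvFoldl_eq_bLoop l _ 0 []
    · rw [if_neg he, if_pos (by omega : (l.length : Int) % 2 = 1)]
      obtain ⟨k, hk⟩ : ∃ k : Nat, (l.length : Int) - 1 = 2 * (k : Int) := by
        refine ⟨((l.length - 1) / 2 : Nat), ?_⟩; push_cast; omega
      rw [hk]
      obtain ⟨hA2, hA1⟩ := pvALoop_rev l k
      rw [if_pos hA2, hA1, show (2 * (k : Int) + 1) = (l.length : Int) from by omega,
        pvBLoop_append l ((l.length : Int)) 1 [pvMakeDecimal (PySem.List.pyGetD l 0 "") none]]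
      simp
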